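-- pv_equiv track=rewrite | github.com/dethworks/GOA-Homeworks | level 60/Classwork/Class.py | max_possible_score
-- ===== SOURCE A (Python) =====
-- def max_possible_score(points, seen):
--     total_score = 0
--
--     for key in points:
--         value = points[key]
--
--         if key in seen:
--             total_score += value * 2
--         else:
--             total_score += value
--
--     return total_score
-- ===== SOURCE B (Python) =====
-- def max_possible_score(points, seen):
--     base = sum(points[k] for k in points)
--     bonus = sum(points[k] for k in points if k in seen)
--     return base + bonus
-- ===== Notes on version B (the rewrite author's own statement) =====
-- stated objective: simpler
-- what changed: Replaces A's single branching accumulation loop with two separate sum passes: an unconditional base total plus a second total over only the seen keys.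
import Mathlib
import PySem

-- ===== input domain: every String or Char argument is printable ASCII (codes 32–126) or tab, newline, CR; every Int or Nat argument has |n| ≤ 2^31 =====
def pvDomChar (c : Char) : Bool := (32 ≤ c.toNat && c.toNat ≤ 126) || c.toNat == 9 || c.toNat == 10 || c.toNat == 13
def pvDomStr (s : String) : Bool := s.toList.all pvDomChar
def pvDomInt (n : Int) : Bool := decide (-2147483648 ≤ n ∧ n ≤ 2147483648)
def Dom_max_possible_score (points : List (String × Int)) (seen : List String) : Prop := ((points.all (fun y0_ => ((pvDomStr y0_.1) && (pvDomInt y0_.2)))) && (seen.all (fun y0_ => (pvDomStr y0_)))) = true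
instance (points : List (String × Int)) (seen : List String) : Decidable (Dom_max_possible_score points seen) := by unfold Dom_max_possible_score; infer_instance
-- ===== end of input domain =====

-- ===== PORT A =====
-- A: one fold over the dict's keys, doubling the looked-up value when the key is in `seen`.
def max_possible_score (points : List (String × Int)) (seen : List String) : Int :=
  let d := PySem.Dict.ofList points
  d.keys.foldl (fun total_score key =>
    let value := d.getD key 0
    if seen.contains key then total_score + value * 2 else total_score + value) 0

-- ===== PORT B =====
-- B: two sums — an unconditional base total plus a second total over only the seen keys.
def max_possible_score_alt (points : List (String × Int)) (seen : List String) : Int :=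
  let d := PySem.Dict.ofList points
  let base := (d.keys.map (fun k => d.getD k 0)).sum
  let bonus := ((d.keys.filter (fun k => seen.contains k)).map (fun k => d.getD k 0)).sum
  base + bonus

-- ===== PRECONDITION & SPEC =====
def Spec_max_possible_score (points : List (String × Int)) (seen : List String) (out : Int) : Prop := out = max_possible_score_alt points seen
instance (points : List (String × Int)) (seen : List String) (out : Int) : Decidable (Spec_max_possible_score points seen out) := by unfold Spec_max_possible_score; infer_instance

-- ===== CLAIM (what is proved, stated in full; the proofs are below) =====
def Claim_equal_max_possible_score : Prop := ∀ (points : List (String × Int)) (seen : List String), Dom_max_possible_score points seen → Spec_max_possible_score points seen (max_possible_score points seen)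

-- ===== LEMMAS AND PROOFS =====

lemma score_fold_split (f : String → Int) (seen : List String) :
    ∀ (l : List String) (acc : Int),
      l.foldl (fun t k => if seen.contains k then t + f k * 2 else t + f k) acc =
        acc + (l.map f).sum + ((l.filter (fun k => seen.contains k)).map f).sum := by
  intro l
  induction l with
  | nil => simp
  | cons x xs ih =>
    intro acc
    by_cases h : seen.contains x = true <;>
      simp only [List.foldl_cons, List.filter_cons, h, if_true, if_false, Bool.false_eq_true,
        List.map_cons, List.sum_cons, ih] <;> ring

-- ===== VERDICT (by name: the statement is the Claim_ definition above) =====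
theorem max_possible_score_spec : Claim_equal_max_possible_score := by
  intro points seen _
  unfold Spec_max_possible_score max_possible_score max_possible_score_alt
  rw [score_fold_split]
  ring
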